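-- pv_equiv track=rewrite | github.com/Lirarin/Compiladores | mainOnly.py | is_operator_alternated
-- ===== SOURCE A (Python) =====
-- OPERATORS = ['*', '+', '-', '*', '/'] # Conjunto de operadores passado na atividade
--
-- def is_operator_alternated(string):# checa se os operadores estão alternados
--     previous = None
--     for character in string:
--         if character in OPERATORS:
--             if previous in ('*', '+', '-', '/'):
--                 return False
--         previous = character
--     return True
-- ===== SOURCE B (Python) =====
-- OPERATORS = ['*', '+', '-', '*', '/'] # Conjunto de operadores passado na atividade
--
-- def is_operator_alternated(string):
--     # Stage 1: record the index of every operator occurrence.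
--     positions = [i for i, c in enumerate(string) if c in "*+-/"]
--     # Stage 2: operators are alternated iff consecutive operator positions
--     # are never adjacent (gap of at least 2).
--     return all(j - i > 1 for i, j in zip(positions, positions[1:]))
-- ===== Notes on version B (the rewrite author's own statement) =====
-- stated objective: alternative
-- what changed: Instead of A's single pass tracking the previous character with an early return, B first builds the list of indices of operator occurrences and then checks arithmetically that consecutive operator positions differ by more than 1.
import Mathlib
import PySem

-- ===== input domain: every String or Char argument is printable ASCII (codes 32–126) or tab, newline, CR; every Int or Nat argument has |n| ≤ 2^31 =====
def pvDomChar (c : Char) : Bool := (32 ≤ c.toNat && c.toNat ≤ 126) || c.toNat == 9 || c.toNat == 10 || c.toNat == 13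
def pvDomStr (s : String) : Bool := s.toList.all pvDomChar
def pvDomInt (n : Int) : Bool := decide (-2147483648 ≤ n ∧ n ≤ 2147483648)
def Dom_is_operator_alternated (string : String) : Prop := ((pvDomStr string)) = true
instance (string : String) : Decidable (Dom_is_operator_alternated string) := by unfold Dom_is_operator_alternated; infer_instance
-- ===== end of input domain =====

-- B replaces A's previous-character state machine by a staged computation: collect
-- the indices of operator occurrences, then check consecutive gaps (alternative; same cost).

-- ===== PORT A =====
-- A's loop with `previous` state and early return, as structural recursion over the characters.
def pvGoA : Option Char → List Char → Bool
  | _, [] => true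
  | previous, c :: rest =>
    if (['*', '+', '-', '*', '/'].contains c) then
      if (match previous with
          | some p => (['*', '+', '-', '/'].contains p)
          | none => false) then
        false
      else
        pvGoA (some c) rest
    else
      pvGoA (some c) rest

def is_operator_alternated (string : String) : Bool :=
  pvGoA none string.toList

-- ===== PORT B =====
def pvIsOp (c : Char) : Bool := (['*', '+', '-', '/'].contains c)

def is_operator_alternated_alt (string : String) : Bool :=
  let positions := ((string.toList.zipIdx).filter (fun p => pvIsOp p.1)).map (fun p => (p.2 : Int))
  (positions.zip positions.tail).all (fun p => p.2 - p.1 > 1)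

-- ===== PRECONDITION & SPEC =====
def Spec_is_operator_alternated (string : String) (out : Bool) : Prop := out = is_operator_alternated_alt string
instance (string : String) (out : Bool) : Decidable (Spec_is_operator_alternated string out) := by unfold Spec_is_operator_alternated; infer_instance

-- ===== CLAIM (what is proved, stated in full; the proofs are below) =====
def Claim_equal_is_operator_alternated : Prop := ∀ (string : String), Dom_is_operator_alternated string → Spec_is_operator_alternated string (is_operator_alternated string)

-- ===== LEMMAS AND PROOFS =====

-- abstract form of A's loop: only `pvIsOp previous` matters
def pvGoA' : Bool → List Char → Bool
  | _, [] => true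
  | b, c :: rest => if b && pvIsOp c then false else pvGoA' (pvIsOp c) rest

-- the index list B builds, as a structural recursion
def pvOpIdx : Int → List Char → List Int
  | _, [] => []
  | n, c :: rest => if pvIsOp c then n :: pvOpIdx (n + 1) rest else pvOpIdx (n + 1) rest

def pvGaps (l : List Int) : Bool := (l.zip l.tail).all (fun p => p.2 - p.1 > 1)

def pvPrevOp : Option Char → Bool
  | none => false
  | some p => pvIsOp p

theorem pvHdup : ∀ x : Char, (['*', '+', '-', '*', '/'].contains x) = pvIsOp x := by
  intro x; simp only [pvIsOp, List.contains_cons, List.contains_nil]; cases x == '*' <;> simp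

theorem pvGoA_cons (prev : Option Char) (c : Char) (rest : List Char) :
    pvGoA prev (c :: rest) = if pvPrevOp prev && pvIsOp c then false else pvGoA (some c) rest := by
  cases prev with
  | none =>
    simp only [pvGoA, pvPrevOp, Bool.false_and]
    split <;> simp
  | some p =>
    simp only [pvGoA, pvPrevOp, pvHdup, pvIsOp]
    generalize pvGoA (some c) rest = g
    split
    · rename_i h
      simp only [List.contains_eq_mem, decide_eq_true_eq, List.mem_cons,
        List.not_mem_nil, or_false] at h
      rcases h with h | h | h | h <;> subst h <;> cases g <;> simp
    · rename_i h
      simp only [List.contains_eq_mem, decide_eq_true_eq, List.mem_cons,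
        List.not_mem_nil, or_false, not_or] at h
      obtain ⟨h1, h2, h3, h4⟩ := h
      cases g <;> simp [h1, h2, h3, h4]

theorem pvGoA_eq_goA' (l : List Char) : ∀ (prev : Option Char),
    pvGoA prev l = pvGoA' (pvPrevOp prev) l := by
  induction l with
  | nil => intro prev; cases prev <;> rfl
  | cons c rest ih =>
    intro prev
    rw [pvGoA_cons, ih (some c)]
    simp [pvGoA', pvPrevOp]

theorem pvOpIdx_ge (l : List Char) : ∀ (n x : Int), x ∈ pvOpIdx n l → n ≤ x := by
  induction l with
  | nil => intro n x h; simp [pvOpIdx] at h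
  | cons c rest ih =>
    intro n x h
    simp only [pvOpIdx] at h
    split at h
    · rcases List.mem_cons.mp h with h | h
      · omega
      · have := ih (n + 1) x h; omega
    · have := ih (n + 1) x h; omega

-- dropping a leading index that is at distance ≥ 2 from everything after it
theorem pvGaps_cons_far (n : Int) (idxs : List Int)
    (h : ∀ x ∈ idxs, n + 2 ≤ x) : pvGaps (n :: idxs) = pvGaps idxs := by
  cases idxs with
  | nil => rfl
  | cons k rest =>
    have hk : n + 2 ≤ k := h k (by simp)
    simp only [pvGaps, List.tail_cons, List.zip_cons_cons, List.all_cons]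
    have : (decide (k - n > 1)) = true := by simp; omega
    rw [this, Bool.true_and]

-- the central invariant: gaps of the index list compute A's loop, in both loop states
theorem pvMain (l : List Char) : ∀ (n : Int),
    (pvGaps (pvOpIdx n l) = pvGoA' false l) ∧
    (pvGaps (n :: pvOpIdx (n + 1) l) = pvGoA' true l) := by
  induction l with
  | nil => intro n; constructor <;> rfl
  | cons c rest ih =>
    intro n
    by_cases h : pvIsOp c = true
    · constructor
      · simp only [pvOpIdx, if_pos h]
        have := (ih n).2
        simpa [pvGoA', h] using this
      · simp only [pvOpIdx, if_pos h]
        have : pvGaps (n :: (n + 1) :: pvOpIdx (n + 1 + 1) rest) = false := by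
          simp only [pvGaps, List.tail_cons, List.zip_cons_cons, List.all_cons]
          have : (decide (n + 1 - n > 1)) = false := by simp
          rw [this, Bool.false_and]
        rw [this]
        simp [pvGoA', h]
    · have h' : pvIsOp c = false := by simpa using h
      constructor
      · simp only [pvOpIdx, if_neg h]
        have := (ih (n + 1)).1
        simpa [pvGoA', h'] using this
      · simp only [pvOpIdx, if_neg h]
        rw [pvGaps_cons_far n _ (fun x hx => by have := pvOpIdx_ge rest (n + 1 + 1) x hx; omega)]
        have := (ih (n + 1 + 1)).1
        simpa [pvGoA', h'] using this

theorem pvIdx_eq (l : List Char) : ∀ (k : Nat),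
    ((l.zipIdx k).filter (fun p => pvIsOp p.1)).map (fun p => (p.2 : Int)) = pvOpIdx (k : Int) l := by
  induction l with
  | nil => intro k; rfl
  | cons c rest ih =>
    intro k
    have hc : ((k + 1 : Nat) : Int) = (k : Int) + 1 := by omega
    cases h : pvIsOp c <;>
      simp [List.zipIdx_cons, pvOpIdx, h, ih (k + 1), hc]

theorem pvAlt_eq (s : String) :
    is_operator_alternated_alt s = pvGaps (pvOpIdx 0 s.toList) := by
  unfold is_operator_alternated_alt pvGaps
  rw [pvIdx_eq s.toList 0]
  norm_num

-- ===== VERDICT (by name: the statement is the Claim_ definition above) =====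
theorem is_operator_alternated_spec : Claim_equal_is_operator_alternated := by
  intro s _
  unfold Spec_is_operator_alternated is_operator_alternated
  rw [pvAlt_eq, pvGoA_eq_goA']
  exact ((pvMain s.toList 0).1).symm
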